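-- pv_equiv track=rewrite | github.com/LeandroBruscato/RecomendadorDePesquisaBovespa | StocksSectors.py | RemoveLastNumber
-- ===== SOURCE A (Python) =====
-- def RemoveLastNumber(word):
--     listOfWord = list(word)
--     listOfWord.reverse()
--     listOfNumber=[]
--     for char in listOfWord:
--         if char.isdigit():
--             listOfNumber.append(char)
--         else:
--             break
--     for Number in listOfNumber:
--         listOfWord.remove(Number)
--     listOfWord.reverse()
--     return ''.join(listOfWord)
-- ===== SOURCE B (Python) =====
-- def RemoveLastNumber(word):
--     i = len(word)
--     while i > 0 and word[i - 1].isdigit():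
--         i -= 1
--     return word[:i]
-- ===== Notes on version B (the rewrite author's own statement) =====
-- stated objective: simpler
-- what changed: B finds the cut index by decrementing from the end while the previous character is a digit and returns one slice, instead of A's reverse / collect-digits / repeated list.remove / reverse / join pipeline over a char list.
import Mathlib
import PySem

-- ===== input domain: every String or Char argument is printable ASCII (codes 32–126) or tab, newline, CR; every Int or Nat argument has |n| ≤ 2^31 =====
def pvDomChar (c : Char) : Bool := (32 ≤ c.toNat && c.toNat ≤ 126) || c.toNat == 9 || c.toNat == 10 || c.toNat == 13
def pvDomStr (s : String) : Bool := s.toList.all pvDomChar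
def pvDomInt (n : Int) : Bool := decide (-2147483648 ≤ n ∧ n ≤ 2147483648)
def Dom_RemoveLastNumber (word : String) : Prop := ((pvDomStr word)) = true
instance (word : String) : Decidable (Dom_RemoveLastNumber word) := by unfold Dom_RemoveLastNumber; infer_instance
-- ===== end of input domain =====

-- B replaces A's reverse / collect-digits / repeated list.remove / reverse / join pipeline by
-- finding the cut index from the end and slicing once; same return value, simpler code.

-- ===== PORT A =====
-- the 'for char in listOfWord: if isdigit append else break' loop
def pvTakeDigits : List Char → List Char
  | [] => []
  | c :: rest => if PySem.Chars.isdigit c then c :: pvTakeDigits rest else []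

-- the 'for Number in listOfNumber: listOfWord.remove(Number)' loop.
-- list.remove never raises here (every Number was read from listOfWord), so the
-- getD fallback of remove? is dead code; it only totalizes the port.
def pvRemoveAll (l : List Char) (nums : List Char) : List Char :=
  nums.foldl (fun acc n => (PySem.List.remove? acc n).getD acc) l

def RemoveLastNumber (word : String) : String :=
  let listOfWord := word.toList
  let rev := listOfWord.reverse
  let listOfNumber := pvTakeDigits rev
  let removed := pvRemoveAll rev listOfNumber
  String.ofList removed.reverse

-- ===== PORT B =====
-- the 'while i > 0 and word[i-1].isdigit(): i -= 1' loop, recursing on i.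
-- word[i-1] is always in range (1 ≤ i ≤ len), so getD's default is dead code.
def pvCut (cs : List Char) : Nat → Nat
  | 0 => 0
  | i + 1 => if PySem.Chars.isdigit (cs.getD i ' ') then pvCut cs i else i + 1

def RemoveLastNumber_alt (word : String) : String :=
  let cs := word.toList
  String.ofList (cs.take (pvCut cs cs.length))   -- word[:i] with 0 ≤ i ≤ len

-- ===== PRECONDITION & SPEC =====
def Spec_RemoveLastNumber (word : String) (out : String) : Prop := out = RemoveLastNumber_alt word
instance (word : String) (out : String) : Decidable (Spec_RemoveLastNumber word out) := by unfold Spec_RemoveLastNumber; infer_instance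

-- ===== CLAIM (what is proved, stated in full; the proofs are below) =====
def Claim_equal_RemoveLastNumber : Prop := ∀ (word : String), Dom_RemoveLastNumber word → Spec_RemoveLastNumber word (RemoveLastNumber word)

-- ===== LEMMAS AND PROOFS =====

theorem pvTakeDigits_eq (l : List Char) :
    pvTakeDigits l = l.takeWhile PySem.Chars.isdigit := by
  induction l with
  | nil => rfl
  | cons c rest ih =>
    simp only [pvTakeDigits, List.takeWhile_cons]
    by_cases h : PySem.Chars.isdigit c <;> simp [h, ih]

theorem pvRemoveAll_takeWhile (l : List Char) :
    pvRemoveAll l (l.takeWhile PySem.Chars.isdigit) = l.dropWhile PySem.Chars.isdigit := by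
  induction l with
  | nil => rfl
  | cons c rest ih =>
    by_cases h : PySem.Chars.isdigit c
    · simpa [pvRemoveAll, List.takeWhile_cons, List.dropWhile_cons, h,
        PySem.List.remove?_cons_self] using ih
    · simp [pvRemoveAll, h]

theorem pvCut_take (cs : List Char) (i : Nat) (hi : i ≤ cs.length) :
    ((cs.take i).reverse.dropWhile PySem.Chars.isdigit).reverse = cs.take (pvCut cs i) := by
  induction i with
  | zero => simp [pvCut]
  | succ j ih =>
    have hj : j < cs.length := hi
    have hget : cs.getD j ' ' = cs[j] := List.getD_eq_getElem cs ' ' hj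
    have htake : cs.take (j + 1) = cs.take j ++ [cs[j]] := by
      rw [List.take_add_one, List.getElem?_eq_getElem hj]
      rfl
    by_cases h : PySem.Chars.isdigit cs[j]
    · rw [pvCut, hget, if_pos h, htake, List.reverse_append, List.reverse_singleton,
        List.singleton_append, List.dropWhile_cons, if_pos h]
      exact ih (Nat.le_of_lt hj)
    · rw [pvCut, hget, if_neg h, htake, List.reverse_append, List.reverse_singleton,
        List.singleton_append, List.dropWhile_cons, if_neg h, List.reverse_cons,
        List.reverse_reverse, ← htake]

-- ===== VERDICT (by name: the statement is the Claim_ definition above) =====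
theorem RemoveLastNumber_spec : Claim_equal_RemoveLastNumber := by
  intro word _
  show RemoveLastNumber word = RemoveLastNumber_alt word
  have h := pvCut_take word.toList word.toList.length (Nat.le_refl _)
  simp only [List.take_length] at h
  simp only [RemoveLastNumber, RemoveLastNumber_alt, pvTakeDigits_eq, pvRemoveAll_takeWhile]
  rw [← h]
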